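-- pv_equiv track=rewrite | github.com/BrooklynD23/HackathonForBetterFuture2026 | Category 3 - IA West Smart Match CRM/src/api/routers/portals.py | _infer_role_from_email
-- ===== SOURCE A (Python) =====
-- def _infer_role_from_email(email: str) -> str:
--     """Infer default portal role from email (used when UI does not send an explicit role)."""
--     if email.endswith("@iawest.org"):
--         return "ia_admin"
--     if email.endswith("@testset.com"):
--         return "volunteer"
--     if any(
--         email.endswith(domain)
--         for domain in ("@cpp.edu", "@uci.edu", "@csuf.edu", "@ucsd.edu", "@usc.edu")
--     ):
--         return "event_coordinator"
--     return "student"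
-- ===== SOURCE B (Python) =====
-- _ROLE_BY_DOMAIN = {
--     "iawest.org": "ia_admin",
--     "testset.com": "volunteer",
--     "cpp.edu": "event_coordinator",
--     "uci.edu": "event_coordinator",
--     "csuf.edu": "event_coordinator",
--     "ucsd.edu": "event_coordinator",
--     "usc.edu": "event_coordinator",
-- }
--
--
-- def _infer_role_from_email(email: str) -> str:
--     """Infer default portal role from email (used when UI does not send an explicit role)."""
--     _local, sep, domain = email.rpartition("@")
--     if not sep:
--         return "student"
--     return _ROLE_BY_DOMAIN.get(domain, "student")
-- ===== Notes on version B (the rewrite author's own statement) =====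
-- stated objective: simpler
-- what changed: Replaces the chain of endswith suffix scans with one rpartition at the last '@' and a single dict lookup of the domain.
import Mathlib
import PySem

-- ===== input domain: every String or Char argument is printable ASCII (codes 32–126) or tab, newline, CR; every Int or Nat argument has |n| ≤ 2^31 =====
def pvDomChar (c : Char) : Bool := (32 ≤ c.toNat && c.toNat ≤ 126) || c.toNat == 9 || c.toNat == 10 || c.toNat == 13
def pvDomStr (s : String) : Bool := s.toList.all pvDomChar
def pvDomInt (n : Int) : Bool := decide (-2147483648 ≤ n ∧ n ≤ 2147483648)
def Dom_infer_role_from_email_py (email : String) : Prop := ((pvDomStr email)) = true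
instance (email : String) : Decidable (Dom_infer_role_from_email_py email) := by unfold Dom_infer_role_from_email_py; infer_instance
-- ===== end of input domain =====

-- B replaces A's chain of endswith suffix scans by one split at the last '@' plus a single
-- table lookup of the domain (simpler decomposition; return value only, no side effects).

-- ===== PORT A =====
def infer_role_from_email_py (email : String) : String :=
  if PySem.Str.endswith email "@iawest.org" then "ia_admin"
  else if PySem.Str.endswith email "@testset.com" then "volunteer"
  else if ["@cpp.edu", "@uci.edu", "@csuf.edu", "@ucsd.edu", "@usc.edu"].any
      (fun domain => PySem.Str.endswith email domain) then "event_coordinator"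
  else "student"

-- ===== PORT B =====
def pvRoleByDomain : PySem.Dict String String :=
  PySem.Dict.ofList
    [("iawest.org", "ia_admin"), ("testset.com", "volunteer"),
     ("cpp.edu", "event_coordinator"), ("uci.edu", "event_coordinator"),
     ("csuf.edu", "event_coordinator"), ("ucsd.edu", "event_coordinator"),
     ("usc.edu", "event_coordinator")]

-- hand port of str.rpartition(sep) for a one-char sep (PySem has no rpartition), exact on every
-- string: (sep-found?, part after the last sep; Python's third component — when sep is absent
-- Python returns ('', '', s) and B only reads the emptiness of the middle component).
def pvRPartitionAt (sep : Char) (s : List Char) : Bool × List Char :=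
  let r := s.reverse
  if sep ∈ r then (true, (r.takeWhile (fun c => c ≠ sep)).reverse) else (false, s)

def infer_role_from_email_py_alt (email : String) : String :=
  let (found, domain) := pvRPartitionAt '@' email.toList
  if !found then "student"
  else (pvRoleByDomain.get? (String.ofList domain)).getD "student"

-- ===== PRECONDITION & SPEC =====
def Spec_infer_role_from_email_py (email : String) (out : String) : Prop := out = infer_role_from_email_py_alt email
instance (email : String) (out : String) : Decidable (Spec_infer_role_from_email_py email out) := by unfold Spec_infer_role_from_email_py; infer_instance

-- ===== CLAIM (what is proved, stated in full; the proofs are below) =====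
def Claim_equal_infer_role_from_email_py : Prop := ∀ (email : String), Dom_infer_role_from_email_py email → Spec_infer_role_from_email_py email (infer_role_from_email_py email)

-- ===== LEMMAS AND PROOFS =====

-- takeWhile of a block whose elements all satisfy the predicate, followed by a failing head
theorem pv_takeWhile_append (sep : Char) (e t : List Char) (he : ∀ c ∈ e, c ≠ sep) :
    (e ++ sep :: t).takeWhile (fun c => c ≠ sep) = e := by
  induction e with
  | nil => simp
  | cons a e ih =>
      rw [List.cons_append, List.takeWhile_cons, if_pos (by simp [he a (by simp)]),
        ih (fun c hc => he c (by simp [hc]))]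

-- A's suffix test "email ends with '@' ++ d" through the reverse of email: it holds iff '@'
-- occurs in email and the run before the first '@' of the reverse is d.reverse.
theorem pv_endswith_iff (email : String) (d : List Char) (hd : ∀ c ∈ d, c ≠ '@') :
    PySem.Str.endswith email (String.ofList ('@' :: d)) = true ↔
      ('@' ∈ email.toList.reverse ∧
        email.toList.reverse.takeWhile (fun c => c ≠ '@') = d.reverse) := by
  rw [PySem.Str.endswith_eq, String.toList_ofList, PySem.Chars.endswith_iff]
  constructor
  · rintro ⟨t, ht⟩
    have hr : email.toList.reverse = d.reverse ++ '@' :: t.reverse := by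
      rw [← ht]; simp
    exact ⟨by simp [hr],
      by rw [hr, pv_takeWhile_append _ _ _ (fun c hc => hd c (by simpa using hc))]⟩
  · rintro ⟨hmem, htake⟩
    have hsplit : email.toList.reverse =
        email.toList.reverse.takeWhile (fun c => c ≠ '@') ++
          email.toList.reverse.dropWhile (fun c => c ≠ '@') := by
      simp
    rcases hdrop : email.toList.reverse.dropWhile (fun c => c ≠ '@') with _ | ⟨a, t⟩
    · exfalso
      have h1 : '@' ∈ email.toList.reverse.takeWhile (fun c => c ≠ '@') := by
        rw [hsplit, hdrop] at hmem; simpa using hmem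
      have := List.mem_takeWhile_imp h1
      simp at this
    · have ha : a = '@' := by
        have := List.head?_dropWhile_not (p := fun c => c ≠ '@') (l := email.toList.reverse)
        rw [hdrop] at this
        simpa using this
      refine ⟨t.reverse, ?_⟩
      have h2 : email.toList.reverse = d.reverse ++ '@' :: t := by
        rw [hsplit, hdrop, htake, ha]
      have h3 := congrArg List.reverse h2
      simp at h3
      simpa using h3.symm

-- no '@' anywhere in email ⟹ no suffix test of A can fire
theorem pv_endswith_false (email : String) (d : List Char)
    (h : '@' ∉ email.toList.reverse) :
    PySem.Str.endswith email (String.ofList ('@' :: d)) = false := by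
  rw [PySem.Str.endswith_eq, String.toList_ofList, ← Bool.not_eq_true,
    PySem.Chars.endswith_iff]
  rintro ⟨t, ht⟩
  exact h (by rw [← ht]; simp)

-- B's table lookup, unfolded into the same comparison chain on the pre-'@' run of the reverse
set_option maxRecDepth 10000 in
theorem pv_lookup (w : List Char) :
    (pvRoleByDomain.get? (String.ofList w.reverse)).getD "student" =
      (if w = "iawest.org".toList.reverse then "ia_admin"
       else if w = "testset.com".toList.reverse then "volunteer"
       else if w = "cpp.edu".toList.reverse then "event_coordinator"
       else if w = "uci.edu".toList.reverse then "event_coordinator"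
       else if w = "csuf.edu".toList.reverse then "event_coordinator"
       else if w = "ucsd.edu".toList.reverse then "event_coordinator"
       else if w = "usc.edu".toList.reverse then "event_coordinator"
       else "student") := by
  have hiff : ∀ d : String, (d == String.ofList w.reverse) = true ↔ w = d.toList.reverse := by
    intro d
    rw [beq_iff_eq, ← String.toList_inj, String.toList_ofList]
    constructor
    · intro h; rw [h]; simp
    · intro h; rw [h]; simp
  have hb : ∀ d : String, (d == String.ofList w.reverse) = decide (w = d.toList.reverse) := by
    intro d
    by_cases h : w = d.toList.reverse
    · rw [(hiff d).mpr h]; simp [h]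
    · have hf : (d == String.ofList w.reverse) = false := by
        rw [← Bool.not_eq_true, hiff d]; exact h
      rw [hf]; simp [h]
  have hD : pvRoleByDomain = PySem.Dict.mk
      [("iawest.org", "ia_admin"), ("testset.com", "volunteer"),
       ("cpp.edu", "event_coordinator"), ("uci.edu", "event_coordinator"),
       ("csuf.edu", "event_coordinator"), ("ucsd.edu", "event_coordinator"),
       ("usc.edu", "event_coordinator")] := by decide
  rw [hD]
  simp only [PySem.Dict.get?_mk_cons, hb, decide_eq_true_eq]
  split_ifs <;> simp [PySem.Dict.get?]

-- all characters of a key are different from '@' (decide on the Bool 'all'; the ∀-∈ form directly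
-- exceeds the recursion limit)
theorem pv_noAt (s : String) (h : (s.toList.all (fun c => c != '@')) = true) :
    ∀ c ∈ s.toList, c ≠ '@' := by
  intro c hc
  simpa using List.all_eq_true.mp h c hc

theorem infer_role_from_email_py_spec_aux (email : String) :
    infer_role_from_email_py email = infer_role_from_email_py_alt email := by
  have hlit1 : ("@iawest.org" : String) = String.ofList ('@' :: "iawest.org".toList) := by decide
  have hlit2 : ("@testset.com" : String) = String.ofList ('@' :: "testset.com".toList) := by decide
  have hlit3 : ("@cpp.edu" : String) = String.ofList ('@' :: "cpp.edu".toList) := by decide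
  have hlit4 : ("@uci.edu" : String) = String.ofList ('@' :: "uci.edu".toList) := by decide
  have hlit5 : ("@csuf.edu" : String) = String.ofList ('@' :: "csuf.edu".toList) := by decide
  have hlit6 : ("@ucsd.edu" : String) = String.ofList ('@' :: "ucsd.edu".toList) := by decide
  have hlit7 : ("@usc.edu" : String) = String.ofList ('@' :: "usc.edu".toList) := by decide
  unfold infer_role_from_email_py infer_role_from_email_py_alt pvRPartitionAt
  simp only [List.any_cons, List.any_nil, Bool.or_false,
    hlit1, hlit2, hlit3, hlit4, hlit5, hlit6, hlit7]
  by_cases hmem : '@' ∈ email.toList.reverse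
  · have key : ∀ (d : List Char), (∀ c ∈ d, c ≠ '@') →
        (PySem.Str.endswith email (String.ofList ('@' :: d)) =
          decide (email.toList.reverse.takeWhile (fun c => c ≠ '@') = d.reverse)) := by
      intro d hd
      by_cases h : email.toList.reverse.takeWhile (fun c => c ≠ '@') = d.reverse
      · rw [(pv_endswith_iff email d hd).mpr ⟨hmem, h⟩, decide_eq_true h]
      · have hf : PySem.Str.endswith email (String.ofList ('@' :: d)) = false := by
          rw [← Bool.not_eq_true, pv_endswith_iff email d hd]
          exact fun hc => h hc.2
        rw [hf, decide_eq_false h]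
    rw [key _ (pv_noAt "iawest.org" (by decide)), key _ (pv_noAt "testset.com" (by decide)),
      key _ (pv_noAt "cpp.edu" (by decide)), key _ (pv_noAt "uci.edu" (by decide)),
      key _ (pv_noAt "csuf.edu" (by decide)), key _ (pv_noAt "ucsd.edu" (by decide)),
      key _ (pv_noAt "usc.edu" (by decide))]
    rw [if_pos hmem]
    show _ = (pvRoleByDomain.get? (String.ofList
      ((email.toList.reverse.takeWhile (fun c => c ≠ '@')).reverse))).getD "student"
    rw [pv_lookup (email.toList.reverse.takeWhile (fun c => c ≠ '@'))]
    simp only [Bool.or_eq_true, decide_eq_true_eq]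
    split_ifs <;> simp_all
  · have f := pv_endswith_false email
    rw [f _ hmem, f _ hmem, f _ hmem, f _ hmem, f _ hmem, f _ hmem, f _ hmem, if_neg hmem]
    simp

-- ===== VERDICT (by name: the statement is the Claim_ definition above) =====
theorem infer_role_from_email_py_spec : Claim_equal_infer_role_from_email_py := by
  intro email _
  unfold Spec_infer_role_from_email_py
  exact infer_role_from_email_py_spec_aux email
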